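-- pv_equiv track=rewrite | github.com/paiml/depyler | examples/hard_probability_sim.py | random_walk_final_position
-- ===== SOURCE A (Python) =====
-- def lcg_next(seed: int, a: int, c: int, m: int) -> int:
--     """Linear congruential generator: next value."""
--     return (a * seed + c) % m
--
-- def random_walk_final_position(steps: int, seed: int) -> list[int]:
--     """Simulate 2D random walk. Returns [final_x, final_y]."""
--     a: int = 1103515245
--     c: int = 12345
--     m: int = 2147483648
--     x: int = 0
--     y: int = 0
--     current: int = seed
--     i: int = 0
--     while i < steps:
--         current = lcg_next(current, a, c, m)
--         direction: int = current % 4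
--         if direction == 0:
--             x = x + 1
--         elif direction == 1:
--             x = x - 1
--         elif direction == 2:
--             y = y + 1
--         else:
--             y = y - 1
--         i = i + 1
--     return [x, y]
-- ===== SOURCE B (Python) =====
-- def random_walk_final_position(steps: int, seed: int) -> list[int]:
--     """Simulate 2D random walk. Returns [final_x, final_y].
--
--     Closed form exploiting the LCG's structure: a % 4 == 1, c % 4 == 1 and
--     4 divides m, so each step advances current % 4 by exactly 1.  The
--     direction sequence is therefore (seed+1) % 4, (seed+2) % 4, ... — cyclic
--     with period 4 — and every full cycle of 4 steps hits each direction once,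
--     for a net displacement of zero.  Only the steps % 4 trailing steps matter,
--     so the walk is replayed for at most 3 steps regardless of `steps`.
--     """
--     if steps <= 0:
--         return [0, 0]
--     moves = [(1, 0), (-1, 0), (0, 1), (0, -1)]
--     x = 0
--     y = 0
--     for i in range(steps % 4):
--         dx, dy = moves[(seed + 1 + i) % 4]
--         x += dx
--         y += dy
--     return [x, y]
-- ===== Notes on version B (the rewrite author's own statement) =====
-- stated objective: faster
-- what changed: B exploits that a%4==1, c%4==1 and 4|m make the LCG's residue mod 4 advance by exactly 1 each step, so the direction sequence is periodic with period 4 and each full cycle cancels; B skips all full cycles and replays only the trailing steps%4 (at most 3) moves via a delta table, O(1) instead of running the LCG steps times.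
import Mathlib
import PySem

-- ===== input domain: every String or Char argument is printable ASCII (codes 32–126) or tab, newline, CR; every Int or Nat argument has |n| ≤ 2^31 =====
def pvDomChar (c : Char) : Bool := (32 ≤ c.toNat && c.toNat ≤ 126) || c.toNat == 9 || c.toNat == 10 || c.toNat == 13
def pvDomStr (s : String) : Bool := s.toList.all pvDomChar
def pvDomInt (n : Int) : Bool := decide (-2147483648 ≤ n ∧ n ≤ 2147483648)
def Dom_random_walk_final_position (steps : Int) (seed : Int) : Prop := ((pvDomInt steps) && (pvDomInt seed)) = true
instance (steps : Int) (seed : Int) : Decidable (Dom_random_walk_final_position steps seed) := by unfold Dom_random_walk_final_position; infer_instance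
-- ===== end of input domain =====

-- B replaces the O(steps) LCG simulation by an O(1) closed form: since a % 4 = 1,
-- c % 4 = 1 and 4 | m, the direction sequence is periodic with period 4 and every
-- full cycle cancels, so only the trailing steps % 4 moves are replayed.


-- ===== PORT A =====
def lcg_next (seed a c m : Int) : Int := PySem.Int.mod (a * seed + c) m

-- the while loop of A: fuel = remaining iterations, state (x, y, current)
def walkLoopA : Nat → Int → Int → Int → Int × Int × Int
  | 0, x, y, cur => (x, y, cur)
  | n+1, x, y, cur =>
    let cur' := lcg_next cur 1103515245 12345 2147483648
    let direction := PySem.Int.mod cur' 4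
    if direction = 0 then walkLoopA n (x+1) y cur'
    else if direction = 1 then walkLoopA n (x-1) y cur'
    else if direction = 2 then walkLoopA n x (y+1) cur'
    else walkLoopA n x (y-1) cur'

def random_walk_final_position (steps : Int) (seed : Int) : List Int :=
  let r := walkLoopA steps.toNat 0 0 seed
  [r.1, r.2.1]

-- ===== PORT B =====
def movesB : List (Int × Int) := [(1, 0), (-1, 0), (0, 1), (0, -1)]

-- the (at most 3 iterations) for loop of B: fuel = remaining, i = loop index
def walkLoopB (seed : Int) : Nat → Nat → Int → Int → Int × Int
  | 0, _, x, y => (x, y)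
  | n+1, i, x, y =>
    let mv := movesB.getD (PySem.Int.mod (seed + 1 + (i : Int)) 4).toNat (0, 0)
    walkLoopB seed n (i+1) (x + mv.1) (y + mv.2)

def random_walk_final_position_alt (steps : Int) (seed : Int) : List Int :=
  if steps ≤ 0 then [0, 0]
  else
    let p := walkLoopB seed (PySem.Int.mod steps 4).toNat 0 0 0
    [p.1, p.2]

-- ===== PRECONDITION & SPEC =====
def Spec_random_walk_final_position (steps : Int) (seed : Int) (out : List Int) : Prop := out = random_walk_final_position_alt steps seed
instance (steps : Int) (seed : Int) (out : List Int) : Decidable (Spec_random_walk_final_position steps seed out) := by unfold Spec_random_walk_final_position; infer_instance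

-- ===== CLAIM (what is proved, stated in full; the proofs are below) =====
def Claim_equal_random_walk_final_position : Prop := ∀ (steps : Int) (seed : Int), Dom_random_walk_final_position steps seed → Spec_random_walk_final_position steps seed (random_walk_final_position steps seed)

-- ===== LEMMAS AND PROOFS =====

-- abstraction of A's loop: only cur % 4 matters; state s = cur % 4 ∈ [0,4)
def walkXY : Nat → Int → Int → Int → Int × Int
  | 0, _, x, y => (x, y)
  | n+1, s, x, y =>
    let d := (s + 1) % 4
    if d = 0 then walkXY n d (x+1) y
    else if d = 1 then walkXY n d (x-1) y
    else if d = 2 then walkXY n d x (y+1)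
    else walkXY n d x (y-1)

-- one LCG step advances the residue mod 4 by 1 (a ≡ 1, c ≡ 1, 4 ∣ m)
lemma lcg_mod4 (cur : Int) :
    PySem.Int.mod (lcg_next cur 1103515245 12345 2147483648) 4 = (cur % 4 + 1) % 4 := by
  unfold lcg_next
  rw [PySem.Int.mod_eq_emod_of_pos (by norm_num), PySem.Int.mod_eq_emod_of_pos (by norm_num)]
  omega

-- A's loop projected to (x, y) equals walkXY on the residue of cur
lemma walkA_eq_walkXY (n : Nat) : ∀ (cur x y : Int),
    ((walkLoopA n x y cur).1, (walkLoopA n x y cur).2.1) = walkXY n (cur % 4) x y := by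
  induction n with
  | zero => intro cur x y; simp [walkLoopA, walkXY]
  | succ n ih =>
    intro cur x y
    have hm := lcg_mod4 cur
    have hcur4 : lcg_next cur 1103515245 12345 2147483648 % 4 = (cur % 4 + 1) % 4 := by
      rw [← PySem.Int.mod_eq_emod_of_pos (b := (4:Int)) (by norm_num)]; exact hm
    simp only [walkLoopA, walkXY, hm]
    split_ifs <;> rw [ih, hcur4]

-- four consecutive steps of walkXY cancel (each direction taken exactly once)
lemma walkXY_period (n : Nat) (s x y : Int) (hs : s = 0 ∨ s = 1 ∨ s = 2 ∨ s = 3) :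
    walkXY (n+4) s x y = walkXY n s x y := by
  rcases hs with h | h | h | h <;> subst h <;>
    simp only [walkXY] <;> norm_num

-- hence walkXY only depends on n % 4
lemma walkXY_mod (n : Nat) (s x y : Int) (hs : s = 0 ∨ s = 1 ∨ s = 2 ∨ s = 3) :
    walkXY n s x y = walkXY (n % 4) s x y := by
  induction n using Nat.strong_induction_on with
  | _ n ih =>
    by_cases h : n < 4
    · rw [Nat.mod_eq_of_lt h]
    · have h4 : n = (n - 4) + 4 := by omega
      rw [h4, walkXY_period _ _ _ _ hs, ih (n - 4) (by omega)]
      congr 1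
      omega

-- B's loop equals walkXY when s is the residue of seed + i
lemma walkB_eq_walkXY (n : Nat) : ∀ (seed : Int) (i : Nat) (x y s : Int),
    (seed + (i : Int)) % 4 = s →
    walkLoopB seed n i x y = walkXY n s x y := by
  induction n with
  | zero => intro seed i x y s _; simp [walkLoopB, walkXY]
  | succ n ih =>
    intro seed i x y s hsi
    have hs0 : 0 ≤ s ∧ s < 4 := by constructor <;> omega
    have hd : PySem.Int.mod (seed + 1 + (i : Int)) 4 = (s + 1) % 4 := by
      rw [PySem.Int.mod_eq_emod_of_pos (by norm_num)]; omega
    have hnext : (seed + ((i + 1 : Nat) : Int)) % 4 = (s + 1) % 4 := by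
      push_cast; omega
    have hd4 : (s + 1) % 4 = 0 ∨ (s + 1) % 4 = 1 ∨ (s + 1) % 4 = 2 ∨ (s + 1) % 4 = 3 := by
      omega
    simp only [walkLoopB, walkXY, hd]
    rcases hd4 with h | h | h | h <;>
      · simp only [h, movesB, show ((0:Int)).toNat = 0 from rfl, show ((1:Int)).toNat = 1 from rfl,
          show ((2:Int)).toNat = 2 from rfl, show ((3:Int)).toNat = 3 from rfl]
        norm_num [List.getD]
        exact ih seed (i+1) _ _ _ (by rw [hnext, h])

-- ===== VERDICT (by name: the statement is the Claim_ definition above) =====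
theorem random_walk_final_position_spec : Claim_equal_random_walk_final_position := by
  intro steps seed _
  unfold Spec_random_walk_final_position random_walk_final_position random_walk_final_position_alt
  by_cases hpos : steps ≤ 0
  · have h0 : steps.toNat = 0 := by omega
    simp [hpos, h0, walkLoopA]
  · have hs4 : seed % 4 = 0 ∨ seed % 4 = 1 ∨ seed % 4 = 2 ∨ seed % 4 = 3 := by omega
    have hA := walkA_eq_walkXY steps.toNat seed 0 0
    have hr : (PySem.Int.mod steps 4).toNat = steps.toNat % 4 := by
      rw [PySem.Int.mod_eq_emod_of_pos (by norm_num)]; omega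
    have hB := walkB_eq_walkXY (PySem.Int.mod steps 4).toNat seed 0 0 0 (seed % 4)
      (by push_cast; omega)
    simp only [hpos, if_false, hr]
    rw [hr] at hB
    rw [hB, ← walkXY_mod _ _ _ _ hs4]
    simp only [List.cons.injEq, and_true]
    exact ⟨congrArg Prod.fst hA, congrArg Prod.snd hA⟩
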